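-- pv_equiv track=rewrite | github.com/aliberkerenler/Kocaeli-University-Programming-Lab-1 | ProLab3/mainsss.py | find_shortest_path_between_authors
-- ===== SOURCE A (Python) =====
-- def find_shortest_path_between_authors(start_author, end_author, nodes, edges):
--     # BFS için bir kuyruk ve ziyaret edilen düğümler listesi
--     queue = [(start_author, [start_author])]  # (current_node, path_so_far)
--     visited = set()
--
--     while queue:
--         current_node, path = queue.pop(0)
--         if current_node in visited:
--             continue
--         visited.add(current_node)
--
--         # Eğer hedef düğüme ulaşırsak yolu döndür
--         if current_node == end_author:
--             return path
--
--         # Komşu düğümleri sıraya ekle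
--         for edge in edges:
--             if current_node in edge:
--                 neighbor = edge[0] if edge[1] == current_node else edge[1]
--                 if neighbor not in visited:
--                     queue.append((neighbor, path + [neighbor]))
--
--     # Eğer hedef düğüme ulaşılamazsa boş liste döndür
--     return []
-- ===== SOURCE B (Python) =====
-- from collections import deque
--
--
-- def find_shortest_path_between_authors(start_author, end_author, nodes, edges):
--     # Flatten each undirected edge into directed arcs, then group them into an
--     # adjacency dict so BFS touches each edge list once instead of rescanning edges.
--     arcs = []
--     for u, v in edges:
--         arcs.append((u, u if v == u else v))
--         if v != u:
--             arcs.append((v, u))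
--     adj = {}
--     for a, b in arcs:
--         adj.setdefault(a, []).append(b)
--
--     visited = {start_author}
--     queue = deque([[start_author]])
--     while queue:
--         path = queue.popleft()
--         current = path[-1]
--         if current == end_author:
--             return path
--         for nb in adj.get(current, []):
--             if nb not in visited:
--                 visited.add(nb)
--                 queue.append(path + [nb])
--     return []
-- ===== Notes on version B (the rewrite author's own statement) =====
-- stated objective: alternative
-- what changed: Prebuilds an adjacency dict from the edge list and marks nodes visited at enqueue time, so each BFS dequeue scans only that node's neighbor list instead of rescanning every edge, and no node is queued twice.
import Mathlib
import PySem

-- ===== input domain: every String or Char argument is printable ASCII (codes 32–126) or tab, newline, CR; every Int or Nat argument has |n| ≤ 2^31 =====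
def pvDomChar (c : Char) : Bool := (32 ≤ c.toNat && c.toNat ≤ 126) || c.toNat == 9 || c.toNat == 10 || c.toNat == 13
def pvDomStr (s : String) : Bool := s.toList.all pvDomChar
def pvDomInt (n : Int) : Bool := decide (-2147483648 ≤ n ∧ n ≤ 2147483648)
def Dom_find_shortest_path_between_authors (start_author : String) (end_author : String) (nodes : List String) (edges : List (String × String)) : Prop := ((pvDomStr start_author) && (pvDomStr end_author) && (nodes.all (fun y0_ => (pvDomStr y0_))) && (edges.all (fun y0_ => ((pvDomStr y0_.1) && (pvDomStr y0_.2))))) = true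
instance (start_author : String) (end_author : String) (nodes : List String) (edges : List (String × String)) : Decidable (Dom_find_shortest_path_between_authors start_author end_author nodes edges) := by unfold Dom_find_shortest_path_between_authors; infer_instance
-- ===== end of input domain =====

-- B prebuilds an adjacency dict and marks nodes visited at enqueue time, so BFS scans each
-- neighbor list once instead of rescanning all edges at every dequeue.


-- ===== PORT A =====
-- fuel bounding the number of while-loop iterations; proved sufficient in the lemmas below
def pvFuelA (edges : List (String × String)) : Nat :=
  2 + (1 + 2 * edges.length) * (edges.length + 1)

-- the while-loop of A: queue of (current_node, path), visited checked at pop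
def pvRunA (end_author : String) (edges : List (String × String)) :
    Nat → List (String × List String) → PySem.Set String → List String
  | 0, _, _ => []
  | _ + 1, [], _ => []
  | f + 1, (c, path) :: rest, visited =>
    if PySem.Set.contains visited c then pvRunA end_author edges f rest visited
    else
      let visited' := PySem.Set.add visited c
      if c == end_author then path
      else
        pvRunA end_author edges f
          (edges.foldl (fun q e =>
            if e.1 == c || e.2 == c then
              let nb := if e.2 == c then e.1 else e.2
              if PySem.Set.contains visited' nb then q else q ++ [(nb, path ++ [nb])]
            else q) rest)
          visited'

def find_shortest_path_between_authors (start_author : String) (end_author : String)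
    (nodes : List String) (edges : List (String × String)) : List String :=
  pvRunA end_author edges (pvFuelA edges) [(start_author, [start_author])] PySem.Set.empty

-- ===== PORT B =====
def pvFuelB (edges : List (String × String)) : Nat :=
  2 * edges.length + 2

-- the first loop of B: flatten each undirected edge into directed arcs
def pvArcs (edges : List (String × String)) : List (String × String) :=
  edges.foldl (fun ps e =>
    let ps := ps ++ [(e.1, if e.2 == e.1 then e.1 else e.2)]
    if e.2 == e.1 then ps else ps ++ [(e.2, e.1)]) []

-- the second loop of B: adj.setdefault(a, []).append(b)  ==  adj[a] = adj.get(a, []) + [b]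
def pvAdj (edges : List (String × String)) : PySem.Dict String (List String) :=
  (pvArcs edges).foldl (fun d p => PySem.Dict.modify d p.1 [] (· ++ [p.2])) PySem.Dict.empty

-- the while-loop of B: queue of paths, visited marked at enqueue
def pvRunB (end_author : String) (adj : PySem.Dict String (List String)) :
    Nat → List (List String) → PySem.Set String → List String
  | 0, _, _ => []
  | _ + 1, [], _ => []
  | f + 1, path :: rest, visited =>
    let current := (PySem.List.pyGet? path (-1)).getD ""  -- path[-1]; queue paths are nonempty, so exact
    if current == end_author then path
    else
      let st := (PySem.Dict.getD adj current []).foldl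
        (fun (st : List (List String) × PySem.Set String) nb =>
          if PySem.Set.contains st.2 nb then st
          else (st.1 ++ [path ++ [nb]], PySem.Set.add st.2 nb)) (rest, visited)
      pvRunB end_author adj f st.1 st.2

def find_shortest_path_between_authors_alt (start_author : String) (end_author : String)
    (nodes : List String) (edges : List (String × String)) : List String :=
  pvRunB end_author (pvAdj edges) (pvFuelB edges) [[start_author]] (PySem.Set.ofList [start_author])

-- ===== PRECONDITION & SPEC =====
def Spec_find_shortest_path_between_authors (start_author : String) (end_author : String) (nodes : List String) (edges : List (String × String)) (out : List String) : Prop := out = find_shortest_path_between_authors_alt start_author end_author nodes edges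
instance (start_author : String) (end_author : String) (nodes : List String) (edges : List (String × String)) (out : List String) : Decidable (Spec_find_shortest_path_between_authors start_author end_author nodes edges out) := by unfold Spec_find_shortest_path_between_authors; infer_instance

-- ===== CLAIM (what is proved, stated in full; the proofs are below) =====
def Claim_equal_find_shortest_path_between_authors : Prop := ∀ (start_author : String) (end_author : String) (nodes : List String) (edges : List (String × String)), Dom_find_shortest_path_between_authors start_author end_author nodes edges → Spec_find_shortest_path_between_authors start_author end_author nodes edges (find_shortest_path_between_authors start_author end_author nodes edges)

-- ===== LEMMAS AND PROOFS =====

-- the neighbor list of c, in the order A's inner edge scan produces it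
def pvNbrs (c : String) (edges : List (String × String)) : List String :=
  edges.flatMap (fun e => if e.1 == c || e.2 == c then [if e.2 == c then e.1 else e.2] else [])

-- first-occurrence filter on plain nodes (how B's visited-at-enqueue thins a node list)
def pvFdlN (vis : PySem.Set String) : List String → List String
  | [] => []
  | x :: xs => if PySem.Set.contains vis x then pvFdlN vis xs else x :: pvFdlN (PySem.Set.add vis x) xs

-- first-occurrence filter on A's queue entries, yielding the corresponding B queue (of paths)
def pvFdl (vis : PySem.Set String) : List (String × List String) → List (List String)
  | [] => []
  | (c, p) :: rest =>
    if PySem.Set.contains vis c then pvFdl vis rest else p :: pvFdl (PySem.Set.add vis c) rest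

-- the directed arcs one edge contributes in B's first loop
def pvArcContrib (e : String × String) : List (String × String) :=
  (e.1, if e.2 == e.1 then e.1 else e.2) :: (if e.2 == e.1 then [] else [(e.2, e.1)])

lemma pvRunB_nil (ea : String) (adj : PySem.Dict String (List String)) (f : Nat)
    (vis : PySem.Set String) : pvRunB ea adj f [] vis = [] := by
  cases f <;> rfl

lemma pv_arcs_fold (E : List (String × String)) (acc : List (String × String)) :
    E.foldl (fun ps e =>
      let ps := ps ++ [(e.1, if e.2 == e.1 then e.1 else e.2)]
      if e.2 == e.1 then ps else ps ++ [(e.2, e.1)]) acc = acc ++ E.flatMap pvArcContrib := by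
  induction E generalizing acc with
  | nil => simp
  | cons e es ih =>
    simp only [List.foldl_cons, List.flatMap_cons]
    rw [ih]
    split_ifs with h <;> simp [pvArcContrib, h, List.append_assoc]

lemma pv_contrib_filter (c : String) (e : String × String) :
    ((pvArcContrib e).filter (fun p => p.1 == c)).map (·.2)
      = (if e.1 == c || e.2 == c then [if e.2 == c then e.1 else e.2] else []) := by
  by_cases h1 : e.2 = e.1 <;> by_cases h2 : e.1 = c <;> by_cases h3 : e.2 = c <;>
    simp_all [pvArcContrib]

lemma pv_adj_getD (edges : List (String × String)) (c : String) :
    PySem.Dict.getD (pvAdj edges) c [] = pvNbrs c edges := by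
  unfold pvAdj pvArcs
  rw [pv_arcs_fold, List.nil_append, PySem.Dict.getD_foldl_modify_append]
  rw [PySem.Dict.getD_empty, List.nil_append]
  induction edges with
  | nil => rfl
  | cons e es ih =>
    simp only [List.flatMap_cons, List.filter_append, List.map_append, ih, pvNbrs]
    rw [pv_contrib_filter]

lemma pv_runA_loop (c : String) (vis : PySem.Set String) (p : List String)
    (E : List (String × String)) (acc : List (String × List String)) :
    E.foldl (fun q e =>
        if e.1 == c || e.2 == c then
          let nb := if e.2 == c then e.1 else e.2
          if PySem.Set.contains vis nb then q else q ++ [(nb, p ++ [nb])]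
        else q) acc
      = acc ++ ((pvNbrs c E).filter (fun x => !(PySem.Set.contains vis x))).map
          (fun nb => (nb, p ++ [nb])) := by
  induction E generalizing acc with
  | nil => simp [pvNbrs]
  | cons e es ih =>
    have hcons : pvNbrs c (e :: es)
        = (if e.1 == c || e.2 == c then [if e.2 == c then e.1 else e.2] else []) ++ pvNbrs c es := rfl
    simp only [List.foldl_cons, hcons, List.filter_append, List.map_append]
    split_ifs <;> rw [ih] <;> simp_all [List.append_assoc]

lemma pv_runB_loop (p : List String) (L : List String) (q : List (List String))
    (vis : PySem.Set String) :
    L.foldl (fun (st : List (List String) × PySem.Set String) nb =>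
        if PySem.Set.contains st.2 nb then st
        else (st.1 ++ [p ++ [nb]], PySem.Set.add st.2 nb)) (q, vis)
      = (q ++ (pvFdlN vis L).map (fun nb => p ++ [nb]), PySem.Set.update vis L) := by
  induction L generalizing q vis with
  | nil => simp [pvFdlN, PySem.Set.update]
  | cons x xs ih =>
    simp only [List.foldl_cons, pvFdlN]
    rw [PySem.Set.update_cons]
    split_ifs with h
    · rw [ih, PySem.Set.add_of_mem (by simpa [PySem.Set.contains_iff] using h)]
    · rw [ih]; simp [List.append_assoc]

lemma pv_fdl_append (a b : List (String × List String)) (vis : PySem.Set String) :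
    pvFdl vis (a ++ b) = pvFdl vis a ++ pvFdl (PySem.Set.update vis (a.map (·.1))) b := by
  induction a generalizing vis with
  | nil => simp [pvFdl, PySem.Set.update]
  | cons cp rest ih =>
    obtain ⟨c, p⟩ := cp
    simp only [List.cons_append, pvFdl, List.map_cons]
    rw [PySem.Set.update_cons]
    split_ifs with h
    · rw [ih, PySem.Set.add_of_mem (by simpa [PySem.Set.contains_iff] using h)]
    · rw [ih]; simp

lemma pv_fdlN_congr (L : List String) (S T : PySem.Set String)
    (h : ∀ x, x ∈ S ↔ x ∈ T) : pvFdlN S L = pvFdlN T L := by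
  induction L generalizing S T with
  | nil => rfl
  | cons x xs ih =>
    simp only [pvFdlN]
    by_cases hx : x ∈ S
    · rw [if_pos (by simpa [PySem.Set.contains_iff] using hx),
        if_pos (by simpa [PySem.Set.contains_iff] using (h x).mp hx)]
      exact ih S T h
    · rw [if_neg (by simpa [PySem.Set.contains_iff] using hx),
        if_neg (by simpa [PySem.Set.contains_iff] using fun hh => hx ((h x).mpr hh))]
      refine congrArg _ (ih _ _ fun y => ?_)
      rw [PySem.Set.mem_add, PySem.Set.mem_add, h y]

lemma pv_fdlN_filter (L : List String) (V S : PySem.Set String)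
    (h : ∀ x, x ∈ V → x ∈ S) :
    pvFdlN S (L.filter (fun x => !(PySem.Set.contains V x))) = pvFdlN S L := by
  induction L generalizing S with
  | nil => rfl
  | cons x xs ih =>
    by_cases hv : x ∈ V
    · rw [List.filter_cons_of_neg (by simpa [PySem.Set.contains_iff] using hv)]
      rw [ih S h]
      simp only [pvFdlN]
      rw [if_pos (by simpa [PySem.Set.contains_iff] using h x hv)]
    · rw [List.filter_cons_of_pos (by simpa [PySem.Set.contains_iff] using hv)]
      simp only [pvFdlN]
      split_ifs with hs
      · exact ih S h
      · exact congrArg _ (ih _ fun y hy => (PySem.Set.mem_add _ _ _).mpr (Or.inl (h y hy)))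

lemma pv_fdl_map (p : List String) (L : List String) (S : PySem.Set String) :
    pvFdl S (L.map (fun nb => (nb, p ++ [nb]))) = (pvFdlN S L).map (fun nb => p ++ [nb]) := by
  induction L generalizing S with
  | nil => rfl
  | cons x xs ih =>
    simp only [List.map_cons, pvFdl, pvFdlN]
    split_ifs with h
    · exact ih S
    · rw [List.map_cons, ih]

lemma pv_length_update (L : List String) (S : PySem.Set String) :
    (PySem.Set.update S L).length = S.length + (pvFdlN S L).length := by
  induction L generalizing S with
  | nil => simp [pvFdlN, PySem.Set.update]
  | cons x xs ih =>
    rw [PySem.Set.update_cons]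
    simp only [pvFdlN]
    split_ifs with h
    · rw [PySem.Set.add_of_mem (by simpa [PySem.Set.contains_iff] using h), ih]
    · rw [PySem.Set.add_of_not_mem (by simpa [PySem.Set.contains_iff] using h), ih]
      simp
      omega

lemma pv_mem_nbrs {x c : String} {E : List (String × String)} (h : x ∈ pvNbrs c E) :
    ∃ e ∈ E, x = e.1 ∨ x = e.2 := by
  simp only [pvNbrs, List.mem_flatMap] at h
  obtain ⟨e, he, hx⟩ := h
  refine ⟨e, he, ?_⟩
  split at hx
  · split at hx <;> simp at hx <;> simp [hx]
  · simp at hx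

lemma pv_nbrs_len (c : String) (E : List (String × String)) :
    (pvNbrs c E).length ≤ E.length := by
  induction E with
  | nil => simp [pvNbrs]
  | cons e es ih =>
    have hcons : pvNbrs c (e :: es)
        = (if e.1 == c || e.2 == c then [if e.2 == c then e.1 else e.2] else []) ++ pvNbrs c es := rfl
    rw [hcons]
    split_ifs <;> simp <;> omega

lemma pv_pyLast {p : List String} {c : String} (h : p.getLast? = some c) :
    (PySem.List.pyGet? p (-1)).getD "" = c := by
  have hne : p ≠ [] := by rintro rfl; simp at h
  have hlen : 1 ≤ p.length := List.length_pos_iff.mpr hne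
  simp only [PySem.List.pyGet?, PySem.List.pyIdx?]
  rw [List.getLast?_eq_getElem?] at h
  simp [hlen, h]

lemma pv_card_le (U : Finset String) (l : List String) (h : l.Nodup)
    (hsub : ∀ x ∈ l, x ∈ U) : l.length ≤ U.card := by
  rw [← List.toFinset_card_of_nodup h]
  exact Finset.card_le_card (fun x hx => hsub x (List.mem_toFinset.mp hx))

-- the simulation: A's queue/visited state and B's queue/visited state stay related
lemma pv_sim (ea : String) (E : List (String × String)) (adj : PySem.Dict String (List String))
    (hadj : ∀ c, PySem.Dict.getD adj c [] = pvNbrs c E) (U : Finset String)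
    (hU : ∀ e ∈ E, e.1 ∈ U ∧ e.2 ∈ U) :
    ∀ (fA : Nat) (qA : List (String × List String)) (visA : PySem.Set String)
      (fB : Nat) (qB : List (List String)) (visB : PySem.Set String),
      (∀ cp ∈ qA, cp.1 ∈ U ∧ cp.2.getLast? = some cp.1) →
      visA.Nodup → (∀ x ∈ visA, x ∈ U) →
      visB.Nodup → (∀ x ∈ visB, x ∈ U) →
      qB = pvFdl visA qA →
      (∀ x, x ∈ visB ↔ x ∈ visA ∨ x ∈ qA.map (·.1)) →
      qA.length + (U.card - visA.length) * (E.length + 1) < fA →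
      qB.length + (U.card - visB.length) < fB →
      pvRunA ea E fA qA visA = pvRunB ea adj fB qB visB := by
  intro fA
  induction fA with
  | zero => intro qA visA fB qB visB _ _ _ _ _ _ _ hfa _; omega
  | succ f ih =>
    intro qA visA fB qB visB hqA hndA hAU hndB hBU hqB hmemB hfa hfb
    match qA with
    | [] =>
      have : qB = [] := by simpa [pvFdl] using hqB
      subst this
      rw [pvRunB_nil]
      simp only [pvRunA]
    | (c, p) :: rest =>
      have hcU : c ∈ U := (hqA (c, p) (by simp)).1
      have hlast : p.getLast? = some c := (hqA (c, p) (by simp)).2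
      by_cases hc : c ∈ visA
      · -- A pops an already-visited node and skips; B's state does not change
        have hcont : PySem.Set.contains visA c = true := by
          simpa [PySem.Set.contains_iff] using hc
        have hstep : pvRunA ea E (f + 1) ((c, p) :: rest) visA = pvRunA ea E f rest visA := by
          simp only [pvRunA]
          rw [if_pos hcont]
        rw [hstep]
        refine ih rest visA fB qB visB (fun cp hcp => hqA cp (by simp [hcp])) hndA hAU hndB hBU
          ?_ ?_ (by simp only [List.length_cons] at hfa; omega) hfb
        · rw [hqB]; simp only [pvFdl]; rw [if_pos hcont]
        · intro x
          rw [hmemB x]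
          simp only [List.map_cons, List.mem_cons]
          constructor
          · rintro (h | h | h)
            · exact Or.inl h
            · exact Or.inl (h ▸ hc)
            · exact Or.inr h
          · rintro (h | h)
            · exact Or.inl h
            · exact Or.inr (Or.inr h)
      · -- A pops a fresh node; B pops the corresponding path
        have hncont : PySem.Set.contains visA c = false := by
          rw [Bool.eq_false_iff]
          simpa [PySem.Set.contains_iff] using hc
        have hqBc : qB = p :: pvFdl (PySem.Set.add visA c) rest := by
          rw [hqB]; simp only [pvFdl]; rw [if_neg (by rw [hncont]; simp)]
        obtain ⟨fb, rfl⟩ : ∃ fb, fB = fb + 1 := by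
          cases fB with
          | zero => rw [hqBc] at hfb; simp at hfb
          | succ fb => exact ⟨fb, rfl⟩
        subst hqBc
        have hstepA : pvRunA ea E (f + 1) ((c, p) :: rest) visA
            = (if c == ea then p else
                pvRunA ea E f
                  (rest ++ ((pvNbrs c E).filter
                      (fun x => !(PySem.Set.contains (PySem.Set.add visA c) x))).map
                    (fun nb => (nb, p ++ [nb])))
                  (PySem.Set.add visA c)) := by
          simp only [pvRunA]
          rw [if_neg (by rw [hncont]; simp), pv_runA_loop]
        have hstepB : pvRunB ea adj (fb + 1) (p :: pvFdl (PySem.Set.add visA c) rest) visB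
            = (if c == ea then p else
                pvRunB ea adj fb
                  (pvFdl (PySem.Set.add visA c) rest
                    ++ (pvFdlN visB (pvNbrs c E)).map (fun nb => p ++ [nb]))
                  (PySem.Set.update visB (pvNbrs c E))) := by
          simp only [pvRunB, pv_pyLast hlast]
          rw [hadj c, pv_runB_loop]
        rw [hstepA, hstepB]
        cases hce : (c == ea)
        · simp only [Bool.false_eq_true, if_false]
          -- set up the invariant for the next step
          have hLU : ∀ x ∈ pvNbrs c E, x ∈ U := by
            intro x hx
            obtain ⟨e, he, hxe⟩ := pv_mem_nbrs hx
            rcases hxe with h | h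
            · exact h ▸ (hU e he).1
            · exact h ▸ (hU e he).2
          have hS2B : ∀ x, (x ∈ PySem.Set.update (PySem.Set.add visA c) (rest.map (·.1)))
              ↔ x ∈ visB := by
            intro x
            rw [PySem.Set.mem_update, PySem.Set.mem_add, hmemB x]
            simp only [List.map_cons, List.mem_cons]
            tauto
          have hqB' : pvFdl (PySem.Set.add visA c) rest
                ++ (pvFdlN visB (pvNbrs c E)).map (fun nb => p ++ [nb])
              = pvFdl (PySem.Set.add visA c)
                  (rest ++ ((pvNbrs c E).filter
                      (fun x => !(PySem.Set.contains (PySem.Set.add visA c) x))).map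
                    (fun nb => (nb, p ++ [nb]))) := by
            symm
            rw [pv_fdl_append]
            congr 1
            rw [pv_fdl_map, pv_fdlN_filter _ (PySem.Set.add visA c) _
                (fun x hx => (PySem.Set.mem_update _ _ _).mpr (Or.inl hx))]
            rw [pv_fdlN_congr _ _ visB hS2B]
          refine ih _ (PySem.Set.add visA c) fb _ (PySem.Set.update visB (pvNbrs c E))
            ?_ (PySem.Set.nodup_add _ _ hndA) ?_ (PySem.Set.nodup_update _ _ hndB) ?_
            hqB' ?_ ?_ ?_
          · -- queue entries: node in U, path ends in its node
            intro cp hcp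
            rcases List.mem_append.mp hcp with h | h
            · exact hqA cp (by simp [h])
            · obtain ⟨nb, hnb, rfl⟩ := List.mem_map.mp h
              refine ⟨hLU nb (List.mem_of_mem_filter hnb), ?_⟩
              simp
          · -- visA' ⊆ U
            intro x hx
            rcases (PySem.Set.mem_add _ _ _).mp hx with h | h
            · exact hAU x h
            · exact h ▸ hcU
          · -- visB' ⊆ U
            intro x hx
            rcases (PySem.Set.mem_update _ _ _).mp hx with h | h
            · exact hBU x h
            · exact hLU x h
          · -- membership invariant for the new states
            intro x
            rw [PySem.Set.mem_update, hmemB x, PySem.Set.mem_add]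
            simp only [List.map_append, List.map_cons, List.mem_cons, List.mem_append,
              List.map_map, List.mem_map, Function.comp]
            constructor
            · rintro ((h | h | h) | h)
              · exact Or.inl (Or.inl h)
              · exact Or.inl (Or.inr h)
              · exact Or.inr (Or.inl h)
              · by_cases hxA : x ∈ visA ∨ x = c
                · exact Or.inl hxA
                · refine Or.inr (Or.inr ⟨x, List.mem_filter.mpr ⟨h, ?_⟩, rfl⟩)
                  rw [not_or] at hxA
                  simp only [Bool.not_eq_true']
                  rw [Bool.eq_false_iff]
                  simp only [ne_eq, PySem.Set.contains_iff, PySem.Set.mem_add]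
                  tauto
            · rintro ((h | h) | h | h)
              · exact Or.inl (Or.inl h)
              · exact Or.inl (Or.inr (Or.inl h))
              · exact Or.inl (Or.inr (Or.inr h))
              · obtain ⟨nb, hnb, rfl⟩ := h
                exact Or.inr (List.mem_of_mem_filter hnb)
          · -- fuel for A
            have hlenA : ((pvNbrs c E).filter
                  (fun x => !(PySem.Set.contains (PySem.Set.add visA c) x))).length
                ≤ E.length :=
              le_trans (List.length_filter_le _ _) (pv_nbrs_len c E)
            have hvisA' : (PySem.Set.add visA c).length = visA.length + 1 := by
              rw [PySem.Set.add_of_not_mem hc]; simp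
            have hcard : visA.length + 1 ≤ U.card := by
              have hsub : ∀ x ∈ PySem.Set.add visA c, x ∈ U := by
                intro x hx
                rcases (PySem.Set.mem_add _ _ _).mp hx with h | h
                · exact hAU x h
                · exact h ▸ hcU
              have := pv_card_le U _ (PySem.Set.nodup_add _ _ hndA) hsub
              rwa [hvisA'] at this
            have hK : U.card - (visA.length + 1) + 1 = U.card - visA.length := by omega
            have hmul : (U.card - (visA.length + 1)) * (E.length + 1) + (E.length + 1)
                = (U.card - visA.length) * (E.length + 1) := by
              rw [← hK]; ring
            simp only [List.length_append, List.length_map, List.length_cons, hvisA'] at hfa ⊢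
            omega
          · -- fuel for B
            have hlen' : (PySem.Set.update visB (pvNbrs c E)).length
                = visB.length + (pvFdlN visB (pvNbrs c E)).length := pv_length_update _ _
            have hcard : (PySem.Set.update visB (pvNbrs c E)).length ≤ U.card := by
              refine pv_card_le U _ (PySem.Set.nodup_update _ _ hndB) ?_
              intro x hx
              rcases (PySem.Set.mem_update _ _ _).mp hx with h | h
              · exact hBU x h
              · exact hLU x h
            simp only [List.length_append, List.length_map, List.length_cons] at hfb ⊢
            omega
        · simp

-- ===== VERDICT (by name: the statement is the Claim_ definition above) =====
theorem find_shortest_path_between_authors_spec : Claim_equal_find_shortest_path_between_authors := by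
  intro s ea nodes E _
  unfold Spec_find_shortest_path_between_authors
  unfold find_shortest_path_between_authors find_shortest_path_between_authors_alt
  have hlen : (s :: E.flatMap (fun e => [e.1, e.2])).length = 1 + 2 * E.length := by
    simp [List.length_flatMap]; omega
  refine pv_sim ea E (pvAdj E) (pv_adj_getD E) (s :: E.flatMap (fun e => [e.1, e.2])).toFinset
    ?_ (pvFuelA E) _ _ (pvFuelB E) _ _ ?_ ?_ ?_ ?_ ?_ ?_ ?_ ?_ ?_
  · intro e he
    constructor <;> refine List.mem_toFinset.mpr (List.mem_cons.mpr (Or.inr ?_)) <;>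
      exact List.mem_flatMap.mpr ⟨e, he, by simp⟩
  · intro cp hcp
    simp only [List.mem_singleton] at hcp
    subst hcp
    exact ⟨List.mem_toFinset.mpr (by simp), by simp⟩
  · simp [PySem.Set.empty]
  · simp [PySem.Set.empty]
  · simp [PySem.Set.ofList, PySem.Set.add, PySem.Set.contains]
  · intro x hx
    refine List.mem_toFinset.mpr (List.mem_cons.mpr (Or.inl ?_))
    simpa [PySem.Set.mem_ofList] using hx
  · rfl
  · intro x
    simp [PySem.Set.mem_ofList, PySem.Set.empty]
  · have hcard : ((s :: E.flatMap (fun e => [e.1, e.2])).toFinset).card ≤ 1 + 2 * E.length :=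
      hlen ▸ List.toFinset_card_le _
    have hmul := Nat.mul_le_mul_right (E.length + 1) hcard
    unfold pvFuelA
    simp only [List.length_singleton, PySem.Set.empty, List.length_nil, Nat.sub_zero]
    omega
  · have hcard : ((s :: E.flatMap (fun e => [e.1, e.2])).toFinset).card ≤ 1 + 2 * E.length :=
      hlen ▸ List.toFinset_card_le _
    unfold pvFuelB
    simp only [List.length_singleton]
    have : (PySem.Set.ofList [s] : PySem.Set String).length = 1 := rfl
    rw [this]
    omega
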